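-- pv_equiv track=rewrite | github.com/lanse-sir/SUP | autocg/quaro.py | sent_pair_lable
-- ===== SOURCE A (Python) =====
-- def sent_pair_lable(q1, q2, lable, para=0):
--     ori = []
--     ref = []
--     for s1, s2, l in zip(q1, q2, lable):
--         if l == para:
--             ori.append(s1)
--             ref.append(s2)
--     return ori, ref
-- ===== SOURCE B (Python) =====
-- def sent_pair_lable(q1, q2, lable, para=0):
--     n = min(len(q1), len(q2), len(lable))
--     idx = [i for i in range(n) if lable[i] == para]
--     return [q1[i] for i in idx], [q2[i] for i in idx]
-- ===== Notes on version B (the rewrite author's own statement) =====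
-- stated objective: alternative
-- what changed: B never zips or builds pairs: it first computes the list of kept positions (indices where lable[i] == para, over the common length), then gathers the two outputs by indexing q1 and q2 through that index list in two independent passes.
import Mathlib
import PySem

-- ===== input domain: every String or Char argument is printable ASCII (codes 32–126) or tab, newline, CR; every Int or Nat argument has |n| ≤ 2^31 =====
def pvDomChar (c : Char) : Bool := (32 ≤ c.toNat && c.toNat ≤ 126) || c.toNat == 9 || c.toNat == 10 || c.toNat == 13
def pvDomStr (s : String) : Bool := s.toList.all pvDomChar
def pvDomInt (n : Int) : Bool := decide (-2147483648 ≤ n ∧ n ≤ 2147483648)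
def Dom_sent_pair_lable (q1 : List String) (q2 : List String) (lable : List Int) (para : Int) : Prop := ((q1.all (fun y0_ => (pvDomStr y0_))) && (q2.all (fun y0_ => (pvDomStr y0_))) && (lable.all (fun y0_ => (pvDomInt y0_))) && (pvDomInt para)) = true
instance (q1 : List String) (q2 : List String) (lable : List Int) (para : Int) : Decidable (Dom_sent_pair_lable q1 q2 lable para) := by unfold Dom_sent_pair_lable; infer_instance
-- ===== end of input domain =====

-- B replaces A's zip-and-append loop by an index-based gather: compute the kept
-- index list once, then read the two output columns by indexing; objective: alternative.


-- ===== PORT A =====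
-- for s1, s2, l in zip(q1, q2, lable): if l == para: ori.append(s1); ref.append(s2)
def sent_pair_lable (q1 : List String) (q2 : List String) (lable : List Int) (para : Int) : List String × List String :=
  (q1.zip (q2.zip lable)).foldl
    (fun acc t => if t.2.2 == para then (acc.1 ++ [t.1], acc.2 ++ [t.2.1]) else acc)
    ([], [])

-- ===== PORT B =====
-- n = min of the three lengths; idx = [i for i in range(n) if lable[i] == para];
-- then gather ([q1[i] for i in idx], [q2[i] for i in idx]); the indices are in
-- range by construction, so getD's defaults are never read.
def sent_pair_lable_alt (q1 : List String) (q2 : List String) (lable : List Int) (para : Int) : List String × List String :=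
  let n := min q1.length (min q2.length lable.length)
  let idx := (List.range n).filter (fun i => lable.getD i 0 == para)
  (idx.map (fun i => q1.getD i ""), idx.map (fun i => q2.getD i ""))

-- ===== PRECONDITION & SPEC =====
def Spec_sent_pair_lable (q1 : List String) (q2 : List String) (lable : List Int) (para : Int) (out : List String × List String) : Prop := out = sent_pair_lable_alt q1 q2 lable para
instance (q1 : List String) (q2 : List String) (lable : List Int) (para : Int) (out : List String × List String) : Decidable (Spec_sent_pair_lable q1 q2 lable para out) := by unfold Spec_sent_pair_lable; infer_instance

-- ===== CLAIM =====
def Claim_equal_sent_pair_lable : Prop := ∀ (q1 : List String) (q2 : List String) (lable : List Int) (para : Int), Dom_sent_pair_lable q1 q2 lable para → Spec_sent_pair_lable q1 q2 lable para (sent_pair_lable q1 q2 lable para)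

-- ===== LEMMAS AND PROOFS =====

-- A's loop with accumulators appends the two columns of the filtered zip
theorem sent_pair_foldl_eq (para : Int) (xs : List (String × String × Int))
    (a b : List String) :
    xs.foldl (fun acc t => if t.2.2 == para then (acc.1 ++ [t.1], acc.2 ++ [t.2.1]) else acc) (a, b)
      = (a ++ (xs.filter (fun t => t.2.2 == para)).map (·.1),
         b ++ (xs.filter (fun t => t.2.2 == para)).map (·.2.1)) := by
  induction xs generalizing a b with
  | nil => simp
  | cons x xs ih =>
    simp only [List.foldl_cons, List.filter_cons]
    by_cases h : (x.2.2 == para) = true <;> simp only [h, if_true, ih] <;> simp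

-- the index-gather of one column equals the corresponding column of the filtered zip
theorem gather_eq (para : Int) (f : String × String × Int → String)
    (g : List String → List String → List Int → Nat → String)
    (hf : ∀ s1 s2 l q1 q2 lable i, g (s1 :: q1) (s2 :: q2) (l :: lable) (i + 1) = g q1 q2 lable i)
    (h0 : ∀ s1 s2 l q1 q2 lable, g (s1 :: q1) (s2 :: q2) (l :: lable) 0 = f (s1, s2, l))
    (q1 q2 : List String) (lable : List Int) :
    ((List.range (min q1.length (min q2.length lable.length))).filter
        (fun i => lable.getD i 0 == para)).map (g q1 q2 lable)
      = ((q1.zip (q2.zip lable)).filter (fun t => t.2.2 == para)).map f := by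
  induction q1 generalizing q2 lable with
  | nil => simp
  | cons s1 q1 ih =>
    cases q2 with
    | nil => simp
    | cons s2 q2 =>
      cases lable with
      | nil => simp
      | cons l lable =>
        have hmin : min (s1 :: q1).length (min (s2 :: q2).length (l :: lable).length)
            = min q1.length (min q2.length lable.length) + 1 := by
          simp [Nat.succ_min_succ]
        have hP : ((fun i => (l :: lable).getD i 0 == para) ∘ Nat.succ)
            = (fun i => lable.getD i 0 == para) := rfl
        have hG : ((g (s1 :: q1) (s2 :: q2) (l :: lable)) ∘ Nat.succ) = g q1 q2 lable :=
          funext (fun i => hf s1 s2 l q1 q2 lable i)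
        rw [hmin, List.range_succ_eq_map, List.filter_cons, List.filter_map, hP,
          List.zip_cons_cons, List.zip_cons_cons, List.filter_cons]
        by_cases h : (l == para) = true
        · rw [if_pos (show ((l :: lable).getD 0 0 == para) = true from h),
            if_pos (show (((s1, s2, l) : String × String × Int).2.2 == para) = true from h),
            List.map_cons, List.map_cons, List.map_map, hG, h0, ih q2 lable]
        · rw [if_neg (show ¬ ((l :: lable).getD 0 0 == para) = true from h),
            if_neg (show ¬ (((s1, s2, l) : String × String × Int).2.2 == para) = true from h),
            List.map_map, hG, ih q2 lable]

-- ===== VERDICT =====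
theorem sent_pair_lable_spec : Claim_equal_sent_pair_lable := by
  intro q1 q2 lable para _
  unfold Spec_sent_pair_lable sent_pair_lable sent_pair_lable_alt
  rw [sent_pair_foldl_eq]
  simp only [List.nil_append, Prod.mk.injEq]
  constructor
  · exact (gather_eq para (·.1) (fun q1 _ _ i => q1.getD i "")
      (by intros; simp) (by intros; simp) q1 q2 lable).symm
  · exact (gather_eq para (·.2.1) (fun _ q2 _ i => q2.getD i "")
      (by intros; simp) (by intros; simp) q1 q2 lable).symm
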